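-- pv_equiv track=rewrite | github.com/morenocuratelo/NeuroGraph | src/ui/pages/2_Explorer.py | color_for_labels
-- ===== SOURCE A (Python) =====
-- from typing import Any, Dict, List
--
-- def color_for_labels(labels: List[str]) -> str:
--     labels_upper = {label.upper() for label in labels}
--     if "ANATOMIA" in labels_upper or "ANATOMY" in labels_upper:
--         return "#ff7f0e"
--     if "MOLECOLA" in labels_upper or "MOLECULE" in labels_upper:
--         return "#1f77b4"
--     if "PATOLOGIA" in labels_upper or "PATHOLOGY" in labels_upper:
--         return "#d62728"
--     return "#7f7f7f"
-- ===== SOURCE B (Python) =====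
-- _PRIORITY = {
--     "ANATOMIA": 0, "ANATOMY": 0,
--     "MOLECOLA": 1, "MOLECULE": 1,
--     "PATOLOGIA": 2, "PATHOLOGY": 2,
-- }
-- _COLORS = ["#ff7f0e", "#1f77b4", "#d62728"]
--
-- def color_for_labels(labels):
--     best = None
--     for label in labels:
--         p = _PRIORITY.get(label.upper())
--         if p is not None and (best is None or p < best):
--             best = p
--     return _COLORS[best] if best is not None else "#7f7f7f"
-- ===== Notes on version B (the rewrite author's own statement) =====
-- stated objective: alternative
-- what changed: Replaces the build-a-set-then-three-membership-tests structure with a single pass over the labels that keeps a running minimum priority index (keyword->priority dict, colors indexed by priority).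
import Mathlib
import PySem

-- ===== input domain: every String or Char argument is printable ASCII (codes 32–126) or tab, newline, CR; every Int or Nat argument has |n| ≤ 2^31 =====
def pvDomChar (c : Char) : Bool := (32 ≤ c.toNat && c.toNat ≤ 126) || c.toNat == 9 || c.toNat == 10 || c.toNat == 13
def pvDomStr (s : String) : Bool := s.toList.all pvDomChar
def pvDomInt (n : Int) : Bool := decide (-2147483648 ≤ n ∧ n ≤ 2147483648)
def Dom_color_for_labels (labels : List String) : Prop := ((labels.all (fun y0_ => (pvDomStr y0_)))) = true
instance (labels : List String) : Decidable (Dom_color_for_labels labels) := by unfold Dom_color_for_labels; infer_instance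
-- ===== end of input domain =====

-- B replaces the set-then-three-membership-tests structure with a single min-priority scan; alternative decomposition, same cost.

-- ===== PORT A =====
def color_for_labels (labels : List String) : String :=
  let labels_upper : PySem.Set String := PySem.Set.ofList (labels.map PySem.Str.upper)
  if PySem.Set.contains labels_upper "ANATOMIA" || PySem.Set.contains labels_upper "ANATOMY" then
    "#ff7f0e"
  else if PySem.Set.contains labels_upper "MOLECOLA" || PySem.Set.contains labels_upper "MOLECULE" then
    "#1f77b4"
  else if PySem.Set.contains labels_upper "PATOLOGIA" || PySem.Set.contains labels_upper "PATHOLOGY" then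
    "#d62728"
  else
    "#7f7f7f"

-- ===== PORT B =====
def pvPriority : PySem.Dict String Int :=
  PySem.Dict.ofList [("ANATOMIA", 0), ("ANATOMY", 0), ("MOLECOLA", 1), ("MOLECULE", 1),
                     ("PATOLOGIA", 2), ("PATHOLOGY", 2)]

def pvColors : List String := ["#ff7f0e", "#1f77b4", "#d62728"]

def color_for_labels_alt (labels : List String) : String :=
  let best : Option Int := labels.foldl (fun best label =>
    match PySem.Dict.get? pvPriority (PySem.Str.upper label) with
    | some p => if best.isNone || p < best.getD 0 then some p else best
    | none => best) none
  match best with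
  | some b => (PySem.List.pyGet? pvColors b).getD "#7f7f7f"  -- COLORS[best]; index always in range
  | none => "#7f7f7f"

-- ===== PRECONDITION & SPEC =====
def Spec_color_for_labels (labels : List String) (out : String) : Prop := out = color_for_labels_alt labels
instance (labels : List String) (out : String) : Decidable (Spec_color_for_labels labels out) := by unfold Spec_color_for_labels; infer_instance

-- ===== CLAIM (what is proved, stated in full; the proofs are below) =====
def Claim_equal_color_for_labels : Prop := ∀ (labels : List String), Dom_color_for_labels labels → Spec_color_for_labels labels (color_for_labels labels)

-- ===== LEMMAS AND PROOFS =====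

def pvStep (best : Option Int) (label : String) : Option Int :=
  match PySem.Dict.get? pvPriority (PySem.Str.upper label) with
  | some p => if best.isNone || p < best.getD 0 then some p else best
  | none => best

def pvOmin : Option Int → Option Int → Option Int
  | none, c => c
  | some a, none => some a
  | some a, some c => some (min a c)

def pvHas0 (labels : List String) : Bool :=
  labels.any (fun l => PySem.Str.upper l == "ANATOMIA" || PySem.Str.upper l == "ANATOMY")
def pvHas1 (labels : List String) : Bool :=
  labels.any (fun l => PySem.Str.upper l == "MOLECOLA" || PySem.Str.upper l == "MOLECULE")
def pvHas2 (labels : List String) : Bool :=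
  labels.any (fun l => PySem.Str.upper l == "PATOLOGIA" || PySem.Str.upper l == "PATHOLOGY")

lemma pvStep_eq_omin (b : Option Int) (l : String) :
    pvStep b l = pvOmin b (PySem.Dict.get? pvPriority (PySem.Str.upper l)) := by
  cases b with
  | none => cases h : PySem.Dict.get? pvPriority (PySem.Str.upper l) <;> simp [pvStep, pvOmin, h]
  | some a =>
    cases h : PySem.Dict.get? pvPriority (PySem.Str.upper l) with
    | none => simp [pvStep, pvOmin, h]
    | some p =>
      simp only [pvStep, pvOmin, h, Option.isNone_some, Option.getD_some, Bool.false_or]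
      by_cases hlt : p < a <;>
        simp only [hlt, decide_true, decide_false, Bool.false_eq_true, if_true, if_false,
          min_def, Option.some.injEq] <;>
        split_ifs <;> omega

lemma pvOmin_assoc (a b c : Option Int) : pvOmin (pvOmin a b) c = pvOmin a (pvOmin b c) := by
  cases a <;> cases b <;> cases c <;> simp [pvOmin, min_assoc]

lemma pvFoldl_omin (labels : List String) (b : Option Int) :
    labels.foldl pvStep b = pvOmin b (labels.foldl pvStep none) := by
  induction labels generalizing b with
  | nil => cases b <;> simp [pvOmin]
  | cons l ls ih =>
    simp only [List.foldl_cons]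
    rw [ih, ih (pvStep none l), pvStep_eq_omin, pvStep_eq_omin, ← pvOmin_assoc]
    rfl

lemma pvPriority_eq :
    pvPriority = PySem.Dict.mk [("ANATOMIA", 0), ("ANATOMY", 0), ("MOLECOLA", 1), ("MOLECULE", 1),
                                ("PATOLOGIA", 2), ("PATHOLOGY", 2)] := by decide

lemma pvAny_or (l : List String) (p q : String → Bool) :
    l.any (fun x => p x || q x) = (l.any p || l.any q) := by
  induction l with
  | nil => rfl
  | cons a t ih => cases hp : p a <;> cases hq : q a <;> simp [List.any_cons, hp, hq, ih]

lemma pvPriority_get? (u : String) :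
    PySem.Dict.get? pvPriority u =
      if u == "ANATOMIA" || u == "ANATOMY" then some 0
      else if u == "MOLECOLA" || u == "MOLECULE" then some 1
      else if u == "PATOLOGIA" || u == "PATHOLOGY" then some 2
      else none := by
  rw [pvPriority_eq]
  by_cases h0 : u = "ANATOMIA" <;> by_cases h1 : u = "ANATOMY" <;>
  by_cases h2 : u = "MOLECOLA" <;> by_cases h3 : u = "MOLECULE" <;>
  by_cases h4 : u = "PATOLOGIA" <;> by_cases h5 : u = "PATHOLOGY" <;>
    simp_all [PySem.Dict.get?] <;>
    exact ⟨fun h => h0 h.symm, fun h => h1 h.symm, fun h => h2 h.symm, fun h => h3 h.symm,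
           fun h => h4 h.symm, fun h => h5 h.symm⟩

lemma pvFold_none_char (labels : List String) :
    labels.foldl pvStep none =
      if pvHas0 labels then some 0
      else if pvHas1 labels then some 1
      else if pvHas2 labels then some 2
      else none := by
  induction labels with
  | nil => simp [pvHas0, pvHas1, pvHas2]
  | cons l ls ih =>
    simp only [List.foldl_cons]
    rw [pvFoldl_omin, ih, pvStep_eq_omin, pvPriority_get?]
    simp only [pvHas0, pvHas1, pvHas2, List.any_cons] at *
    by_cases h0 : (PySem.Str.upper l == "ANATOMIA" || PySem.Str.upper l == "ANATOMY") = true <;>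
    by_cases h1 : (PySem.Str.upper l == "MOLECOLA" || PySem.Str.upper l == "MOLECULE") = true <;>
    by_cases h2 : (PySem.Str.upper l == "PATOLOGIA" || PySem.Str.upper l == "PATHOLOGY") = true <;>
      simp_all [pvOmin] <;>
      split_ifs <;> simp

lemma pvContains_map (labels : List String) (x : String) :
    PySem.Set.contains (PySem.Set.ofList (labels.map PySem.Str.upper)) x =
      labels.any (fun l => PySem.Str.upper l == x) := by
  rcases h : labels.any (fun l => PySem.Str.upper l == x) with _ | _
  · rw [Bool.eq_false_iff]
    intro hc
    rw [PySem.Set.contains_iff, PySem.Set.mem_ofList, List.mem_map] at hc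
    obtain ⟨l, hl, hx⟩ := hc
    rw [Bool.eq_false_iff] at h
    exact h (List.any_eq_true.mpr ⟨l, hl, by simp [hx]⟩)
  · obtain ⟨l, hl, hx⟩ := List.any_eq_true.mp h
    rw [PySem.Set.contains_iff, PySem.Set.mem_ofList, List.mem_map]
    exact ⟨l, hl, by simpa using hx⟩

-- ===== VERDICT (by name: the statement is the Claim_ definition above) =====
theorem color_for_labels_spec : Claim_equal_color_for_labels := by
  intro labels _
  unfold Spec_color_for_labels color_for_labels color_for_labels_alt
  show _ = (match labels.foldl pvStep none with
    | some b => (PySem.List.pyGet? pvColors b).getD "#7f7f7f"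
    | none => "#7f7f7f")
  rw [pvFold_none_char]
  simp only [pvContains_map]
  rw [← pvAny_or, ← pvAny_or, ← pvAny_or]
  show (if pvHas0 labels then _ else if pvHas1 labels then _ else if pvHas2 labels then _ else _) = _
  by_cases h0 : pvHas0 labels <;> by_cases h1 : pvHas1 labels <;> by_cases h2 : pvHas2 labels <;>
    simp only [h0, h1, h2, if_true, Bool.not_eq_true] at * <;>
    simp [pvColors, PySem.List.pyGet?, PySem.List.pyIdx?]
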